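-- pv_equiv track=rewrite | github.com/xyleth/desloppify | desloppify/languages/typescript/fixers/logs.py | _previous_non_empty_line
-- ===== SOURCE A (Python) =====
-- def _previous_non_empty_line(lines: list[str], idx: int) -> str | None:
--     j = idx - 1
--     while j >= 0:
--         stripped = lines[j].strip()
--         if stripped:
--             return stripped
--         j -= 1
--     return None
-- ===== SOURCE B (Python) =====
-- def _previous_non_empty_line(lines: list[str], idx: int) -> str | None:
--     last = None
--     for j in range(idx):
--         s = lines[j].strip()
--         if s:
--             last = s
--     return last
-- ===== Notes on version B (the rewrite author's own statement) =====
-- stated objective: alternative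
-- what changed: Replaces the backward early-return while-loop with a forward range(idx) pass maintaining a 'last non-empty stripped line' accumulator.
import Mathlib
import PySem

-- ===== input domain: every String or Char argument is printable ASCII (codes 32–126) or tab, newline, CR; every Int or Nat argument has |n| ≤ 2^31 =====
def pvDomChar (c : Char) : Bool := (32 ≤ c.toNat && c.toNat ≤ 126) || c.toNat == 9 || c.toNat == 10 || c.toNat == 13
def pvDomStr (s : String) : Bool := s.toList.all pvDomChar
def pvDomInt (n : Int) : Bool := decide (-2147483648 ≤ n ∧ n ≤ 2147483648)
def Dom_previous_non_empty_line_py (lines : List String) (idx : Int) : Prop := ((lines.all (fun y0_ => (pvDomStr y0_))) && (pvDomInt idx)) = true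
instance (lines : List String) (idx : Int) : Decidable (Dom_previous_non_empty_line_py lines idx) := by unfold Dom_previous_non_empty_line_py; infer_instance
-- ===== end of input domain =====

-- B replaces A's backward early-return scan with a forward pass keeping the last non-empty stripped line (alternative decomposition, same cost).

-- ===== PORT A =====
-- while j >= 0: …; j -= 1   — structural recursion on j+1 (aLoopA lines (j+1) runs the loop body at index j, then indices j-1, …, 0)
def aLoopA (lines : List String) : Nat → Option String
  | 0 => none
  | Nat.succ j =>
    match PySem.List.pyGet? lines (j : Int) with
    | none => none   -- IndexError (idx > len(lines)); excluded by Pre_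
    | some s =>
      let stripped := PySem.Str.strip s
      if stripped ≠ "" then some stripped else aLoopA lines j

def previous_non_empty_line_py (lines : List String) (idx : Int) : Option String :=
  aLoopA lines idx.toNat   -- j = idx - 1; while j ≥ 0 runs for j = idx-1 … 0, i.e. idx.toNat iterations

-- ===== PORT B =====
def previous_non_empty_line_py_alt (lines : List String) (idx : Int) : Option String :=
  (PySem.List.pyRange 0 idx 1).foldl
    (fun last j =>
      match PySem.List.pyGet? lines j with
      | none => last   -- IndexError (idx > len(lines)); excluded by Pre_
      | some s =>
        let st := PySem.Str.strip s
        if st ≠ "" then some st else last)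
    none

-- ===== PRECONDITION & SPEC =====
-- Pre_ excludes exactly the inputs where A (and B) raise IndexError: idx exceeding len(lines).
def Pre_previous_non_empty_line_py (lines : List String) (idx : Int) : Prop := idx ≤ (lines.length : Int)
instance (lines : List String) (idx : Int) : Decidable (Pre_previous_non_empty_line_py lines idx) := by unfold Pre_previous_non_empty_line_py; infer_instance
def pvWitness_previous_non_empty_line_py : List String × Int := (["a", " ", "b"], 3)

def Spec_previous_non_empty_line_py (lines : List String) (idx : Int) (out : Option String) : Prop := out = previous_non_empty_line_py_alt lines idx
instance (lines : List String) (idx : Int) (out : Option String) : Decidable (Spec_previous_non_empty_line_py lines idx out) := by unfold Spec_previous_non_empty_line_py; infer_instance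

-- ===== CLAIM (what is proved, stated in full; the proofs are below) =====
def Claim_equal_previous_non_empty_line_py : Prop := ∀ (lines : List String) (idx : Int), Dom_previous_non_empty_line_py lines idx → Pre_previous_non_empty_line_py lines idx → Spec_previous_non_empty_line_py lines idx (previous_non_empty_line_py lines idx)

-- ===== LEMMAS AND PROOFS =====

-- Forward fold over 0..n equals the backward first-match scan, for n ≤ lines.length.
theorem aLoopA_eq_fold (lines : List String) (n : Nat) (h : n ≤ lines.length) :
    aLoopA lines n = (PySem.List.pyRange 0 (n : Int) 1).foldl
      (fun last j =>
        match PySem.List.pyGet? lines j with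
        | none => last
        | some s =>
          let st := PySem.Str.strip s
          if st ≠ "" then some st else last)
      none := by
  induction n with
  | zero => simp [aLoopA, PySem.List.pyRange_one_eq_nil]
  | succ n ih =>
    rw [show ((n + 1 : Nat) : Int) = (n : Int) + 1 from by push_cast; ring,
        PySem.List.pyRange_one_succ_right (by positivity), List.foldl_append,
        ← ih (by omega)]
    simp only [List.foldl_cons, List.foldl_nil, aLoopA]
    rcases hg : PySem.List.pyGet? lines (n : Int) with _ | s
    · exfalso
      rw [PySem.List.pyGet?_natCast] at hg
      simp at hg
      omega
    · rfl

-- ===== VERDICT (by name: the statement is the Claim_ definition above) =====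
theorem previous_non_empty_line_py_spec : Claim_equal_previous_non_empty_line_py := by
  intro lines idx _ hpre
  unfold Spec_previous_non_empty_line_py previous_non_empty_line_py previous_non_empty_line_py_alt
  rcases le_or_gt idx 0 with h | h
  · rw [Int.toNat_of_nonpos h, PySem.List.pyRange_one_eq_nil h]
    simp [aLoopA]
  · have : idx = (idx.toNat : Int) := (Int.toNat_of_nonneg h.le).symm
    rw [this]
    exact aLoopA_eq_fold lines idx.toNat (by unfold Pre_previous_non_empty_line_py at hpre; omega)
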